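-- pv_equiv track=rewrite | github.com/stangelandcl/hardhat | hardhat/version.py | int_prefix
-- ===== SOURCE A (Python) =====
-- def int_prefix(x):
--     i = 0
--     while i < len(x):
--         try:
--             y = int(x[i])
--         except:
--             break
--         i += 1
--
--
--     int_part = int(x[:i]) if i else 0
--     non_int = x[i:]
--     return (int_part, non_int)
-- ===== SOURCE B (Python) =====
-- def int_prefix(x):
--     rest = x.lstrip('0123456789')
--     prefix = x[:len(x) - len(rest)]
--     return (int(prefix) if prefix else 0, rest)
-- ===== Notes on version B (the rewrite author's own statement) =====
-- stated objective: idiomatic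
-- what changed: Replaces the index loop that probes each character with try int(x[i])/except by a single str.lstrip-with-digits call plus a slice to recover the digit prefix.
import Mathlib
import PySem

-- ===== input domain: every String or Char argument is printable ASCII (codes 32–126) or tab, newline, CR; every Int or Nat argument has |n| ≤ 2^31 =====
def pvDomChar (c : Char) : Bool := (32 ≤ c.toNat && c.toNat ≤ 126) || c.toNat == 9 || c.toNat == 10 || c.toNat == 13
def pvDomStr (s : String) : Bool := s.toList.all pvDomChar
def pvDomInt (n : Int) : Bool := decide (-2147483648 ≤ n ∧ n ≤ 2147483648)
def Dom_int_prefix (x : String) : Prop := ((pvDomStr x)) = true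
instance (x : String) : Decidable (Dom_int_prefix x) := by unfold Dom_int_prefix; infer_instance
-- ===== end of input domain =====

-- B replaces A's try/except character scan with one str.lstrip call and a slice (objective: idiomatic).


-- ===== PORT A =====
-- A's while loop: advance i while int(x[i]) parses; try/except becomes the Option test
def intPrefixLoopA (cs : List Char) (i : Nat) : Nat :=
  if h : i < cs.length then
    match PySem.Int.ofChars? [cs[i]] with
    | some _ => intPrefixLoopA cs (i + 1)
    | none => i
  else i
termination_by cs.length - i

def int_prefix (x : String) : Int × String :=
  let cs := x.toList
  let i := intPrefixLoopA cs 0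
  -- int(x[:i]) when i ≠ 0: the slice is then a nonempty run of digits, so ofChars? is some (getD 0 unreachable)
  let int_part : Int := if i ≠ 0 then (PySem.Int.ofChars? (PySem.List.slice cs none (some (i : Int)))).getD 0 else 0
  let non_int := String.mk (PySem.List.slice cs (some (i : Int)) none)
  (int_part, non_int)

-- ===== PORT B =====
def int_prefix_alt (x : String) : Int × String :=
  let cs := x.toList
  -- x.lstrip('0123456789'): ported by hand (exact): drop leading chars contained in the set
  let rest := cs.dropWhile (fun c => ("0123456789".toList).contains c)
  -- x[:len(x) - len(rest)]
  let pre := PySem.List.slice cs none (some ((cs.length : Int) - (rest.length : Int)))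
  -- int(pre) when pre ≠ []: pre is then a nonempty run of digits, so ofChars? is some (getD 0 unreachable)
  ((if pre ≠ [] then (PySem.Int.ofChars? pre).getD 0 else 0), String.mk rest)

-- ===== PRECONDITION & SPEC =====
def Spec_int_prefix (x : String) (out : Int × String) : Prop := out = int_prefix_alt x
instance (x : String) (out : Int × String) : Decidable (Spec_int_prefix x out) := by unfold Spec_int_prefix; infer_instance

-- ===== CLAIM (what is proved, stated in full; the proofs are below) =====
def Claim_equal_int_prefix : Prop := ∀ (x : String), Dom_int_prefix x → Spec_int_prefix x (int_prefix x)

-- ===== LEMMAS AND PROOFS =====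

-- on every Dom character, single-char int() succeeds exactly on the decimal digits
set_option maxRecDepth 4096 in
theorem ofChars_single_isSome_of_range :
    ∀ n ∈ List.range' 9 118,
      (PySem.Int.ofChars? [Char.ofNat n]).isSome = (("0123456789".toList).contains (Char.ofNat n)) := by
  decide

theorem ofChars_single_isSome (c : Char) (hc : pvDomChar c = true) :
    (PySem.Int.ofChars? [c]).isSome = (("0123456789".toList).contains c) := by
  have h9 : 9 ≤ c.toNat ∧ c.toNat < 127 := by
    simp [pvDomChar] at hc; omega
  have hmem : c.toNat ∈ List.range' 9 118 := by
    rw [List.mem_range']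
    exact ⟨c.toNat - 9, by omega, by omega⟩
  have := ofChars_single_isSome_of_range c.toNat hmem
  rwa [Char.ofNat_toNat] at this

theorem takeWhile_congr_mem {α : Type} (p q : α → Bool) :
    ∀ (l : List α), (∀ c ∈ l, p c = q c) → l.takeWhile p = l.takeWhile q := by
  intro l
  induction l with
  | nil => intro _; rfl
  | cons a t ih =>
    intro h
    simp only [List.takeWhile_cons, h a (by simp)]
    cases hq : q a
    · simp
    · simp [ih (fun c hc => h c (by simp [hc]))]

theorem loopA_eq (cs : List Char) :
    ∀ n i, cs.length - i = n → i ≤ cs.length →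
      intPrefixLoopA cs i
        = i + ((cs.drop i).takeWhile (fun c => (PySem.Int.ofChars? [c]).isSome)).length := by
  intro n
  induction n with
  | zero =>
    intro i hn hi
    have hlt : ¬ i < cs.length := by omega
    rw [intPrefixLoopA]
    simp [hlt, List.drop_eq_nil_of_le (by omega : cs.length ≤ i)]
  | succ n ih =>
    intro i hn hi
    have hlt : i < cs.length := by omega
    have hdrop : cs.drop i = cs[i] :: cs.drop (i + 1) := List.drop_eq_getElem_cons hlt
    rw [intPrefixLoopA]
    rw [dif_pos hlt, hdrop, List.takeWhile_cons]
    cases hp : PySem.Int.ofChars? [cs[i]] with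
    | none => simp
    | some v =>
      simp only [Option.isSome_some, if_true]
      rw [ih (i + 1) (by omega) (by omega)]
      simp; omega

-- ===== VERDICT =====
theorem int_prefix_spec : Claim_equal_int_prefix := by
  intro x hdom
  unfold Spec_int_prefix int_prefix int_prefix_alt
  have hpq : ∀ c ∈ x.toList,
      (fun c => (PySem.Int.ofChars? [c]).isSome) c = (fun c => ("0123456789".toList).contains c) c := by
    intro c hc
    have hdc : pvDomChar c = true := by
      unfold Dom_int_prefix pvDomStr at hdom
      exact List.all_eq_true.mp hdom c hc
    exact ofChars_single_isSome c hdc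
  have htake : x.toList.takeWhile (fun c => (PySem.Int.ofChars? [c]).isSome)
      = x.toList.takeWhile (fun c => ("0123456789".toList).contains c) :=
    takeWhile_congr_mem _ _ _ hpq
  have hloop : intPrefixLoopA x.toList 0
      = (x.toList.takeWhile (fun c => ("0123456789".toList).contains c)).length := by
    have := loopA_eq x.toList x.toList.length 0 (by omega) (by omega)
    simpa [htake] using this
  have hsplit : x.toList.takeWhile (fun c => ("0123456789".toList).contains c)
      ++ x.toList.dropWhile (fun c => ("0123456789".toList).contains c) = x.toList :=
    List.takeWhile_append_dropWhile
  have hlen : (x.toList.takeWhile (fun c => ("0123456789".toList).contains c)).length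
      + (x.toList.dropWhile (fun c => ("0123456789".toList).contains c)).length = x.toList.length := by
    rw [← List.length_append, hsplit]
  have htakek : x.toList.take (x.toList.takeWhile (fun c => ("0123456789".toList).contains c)).length
      = x.toList.takeWhile (fun c => ("0123456789".toList).contains c) := by
    have h := List.take_left (l₁ := x.toList.takeWhile (fun c => ("0123456789".toList).contains c))
      (l₂ := x.toList.dropWhile (fun c => ("0123456789".toList).contains c))
    rwa [hsplit] at h
  have hdropk : x.toList.drop (x.toList.takeWhile (fun c => ("0123456789".toList).contains c)).length
      = x.toList.dropWhile (fun c => ("0123456789".toList).contains c) := by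
    have h := List.drop_left (l₁ := x.toList.takeWhile (fun c => ("0123456789".toList).contains c))
      (l₂ := x.toList.dropWhile (fun c => ("0123456789".toList).contains c))
    rwa [hsplit] at h
  have hcast : (x.toList.length : Int)
      - ((x.toList.dropWhile (fun c => ("0123456789".toList).contains c)).length : Int)
      = (((x.toList.takeWhile (fun c => ("0123456789".toList).contains c)).length : Nat) : Int) := by
    omega
  simp only [hloop, hcast, PySem.List.slice_to_natCast, PySem.List.slice_from_natCast,
    htakek, hdropk]
  simp [← List.length_eq_zero_iff]
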